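-- pv_equiv track=rewrite | github.com/LLNL/Surfactant | surfactant/filetypeid.py | check_motorola
-- ===== SOURCE A (Python) =====
-- import string
--
-- def check_motorola(current_line):
--     current_line = current_line.strip()
--     if len(current_line) < 1:
--         return False
--     if current_line[0] != 'S' and current_line[0] != 's':
--         return False
--     for x in range(1, len(current_line)):
--         if current_line[x] not in string.hexdigits:
--             return False
--     return True
-- ===== SOURCE B (Python) =====
-- import re
--
-- _SREC_RE = re.compile(r'[Ss][0-9a-fA-F]*')
--
-- def check_motorola(current_line):
--     return _SREC_RE.fullmatch(current_line.strip()) is not None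
-- ===== Notes on version B (the rewrite author's own statement) =====
-- stated objective: idiomatic
-- what changed: Replaced the explicit first-char check plus per-character hex-digit scan with a single compiled-regex fullmatch ([Ss][0-9a-fA-F]*) over the stripped line; the Lean port of B runs the regex as its 3-state DFA folded over the characters.
import Mathlib
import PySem

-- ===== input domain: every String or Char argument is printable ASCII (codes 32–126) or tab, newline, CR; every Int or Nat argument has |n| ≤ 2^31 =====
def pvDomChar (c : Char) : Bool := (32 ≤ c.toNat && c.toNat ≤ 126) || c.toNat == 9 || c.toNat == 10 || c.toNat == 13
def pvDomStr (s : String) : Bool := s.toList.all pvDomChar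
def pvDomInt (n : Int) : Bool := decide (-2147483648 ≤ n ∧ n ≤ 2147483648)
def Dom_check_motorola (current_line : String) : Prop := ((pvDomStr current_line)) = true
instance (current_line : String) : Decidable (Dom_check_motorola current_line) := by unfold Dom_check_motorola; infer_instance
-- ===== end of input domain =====

-- B replaces A's first-char check + per-character hex scan by one regex fullmatch ([Ss][0-9a-fA-F]*),
-- ported as that regex's 3-state DFA folded over the stripped characters (idiomatic; same cost).

-- ===== PORT A =====
-- string.hexdigits
def pvHexdigits : List Char :=
  ['0','1','2','3','4','5','6','7','8','9','a','b','c','d','e','f','A','B','C','D','E','F']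

def check_motorola (current_line : String) : Bool :=
  let l := PySem.Chars.strip current_line.toList
  if l.length < 1 then false
  else if !(PySem.List.pyGetD l 0 ' ' == 'S') && !(PySem.List.pyGetD l 0 ' ' == 's') then false
  else
    -- for x in range(1, len(l)): early 'return False' on a non-hex char = short-circuiting all
    (PySem.List.pyRange 1 (l.length : Int) 1).all
      (fun x => pvHexdigits.contains (PySem.List.pyGetD l x ' '))

-- ===== PORT B =====
-- the character class [0-9a-fA-F] of the regex
def pvHexClass (c : Char) : Bool :=
  ('0' ≤ c && c ≤ '9') || ('a' ≤ c && c ≤ 'f') || ('A' ≤ c && c ≤ 'F')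

-- DFA of the regex [Ss][0-9a-fA-F]* : state 0 = start, 1 = accepting, 2 = dead
def pvReStep (st : Nat) (c : Char) : Nat :=
  match st with
  | 0 => if c == 'S' || c == 's' then 1 else 2
  | 1 => if pvHexClass c then 1 else 2
  | _ => 2

-- re.fullmatch(r'[Ss][0-9a-fA-F]*', line.strip()) is not None, as the DFA run over the chars
def check_motorola_alt (current_line : String) : Bool :=
  ((PySem.Chars.strip current_line.toList).foldl pvReStep 0) == 1

-- ===== PRECONDITION & SPEC =====
def Spec_check_motorola (current_line : String) (out : Bool) : Prop := out = check_motorola_alt current_line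
instance (current_line : String) (out : Bool) : Decidable (Spec_check_motorola current_line out) := by unfold Spec_check_motorola; infer_instance

-- ===== CLAIM (what is proved, stated in full; the proofs are below) =====
def Claim_equal_check_motorola : Prop := ∀ (current_line : String), Dom_check_motorola current_line → Spec_check_motorola current_line (check_motorola current_line)

-- ===== LEMMAS AND PROOFS =====

-- the dead state of the DFA absorbs
lemma pvFoldlDead (l : List Char) : l.foldl pvReStep 2 = 2 := by
  induction l with
  | nil => rfl
  | cons c t ih => simpa [pvReStep] using ih

-- from the accepting state, staying accepted = every remaining char is in the class
lemma pvFoldlLive (l : List Char) : (l.foldl pvReStep 1 == 1) = l.all pvHexClass := by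
  induction l with
  | nil => rfl
  | cons c t ih =>
    by_cases h : pvHexClass c = true
    · simp [pvReStep, h, ih]
    · simp [pvReStep, h, pvFoldlDead, List.all_cons]

-- membership in string.hexdigits = the regex character class [0-9a-fA-F]
lemma pvHexMemEq (c : Char) : decide (c ∈ pvHexdigits) = pvHexClass c := by
  rw [Bool.eq_iff_iff]
  simp only [pvHexdigits, pvHexClass, List.mem_cons, List.not_mem_nil, or_false,
    decide_eq_true_eq, Bool.or_eq_true, Bool.and_eq_true, Char.le_def,
    UInt32.le_iff_toNat_le, Char.ext_iff, ← UInt32.toNat_inj]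
  simp only [show ('0':Char).val.toNat = 48 from rfl, show ('1':Char).val.toNat = 49 from rfl, show ('2':Char).val.toNat = 50 from rfl, show ('3':Char).val.toNat = 51 from rfl, show ('4':Char).val.toNat = 52 from rfl, show ('5':Char).val.toNat = 53 from rfl, show ('6':Char).val.toNat = 54 from rfl, show ('7':Char).val.toNat = 55 from rfl, show ('8':Char).val.toNat = 56 from rfl, show ('9':Char).val.toNat = 57 from rfl, show ('a':Char).val.toNat = 97 from rfl, show ('b':Char).val.toNat = 98 from rfl, show ('c':Char).val.toNat = 99 from rfl, show ('d':Char).val.toNat = 100 from rfl, show ('e':Char).val.toNat = 101 from rfl, show ('f':Char).val.toNat = 102 from rfl, show ('A':Char).val.toNat = 65 from rfl, show ('B':Char).val.toNat = 66 from rfl, show ('C':Char).val.toNat = 67 from rfl, show ('D':Char).val.toNat = 68 from rfl, show ('E':Char).val.toNat = 69 from rfl, show ('F':Char).val.toNat = 70 from rfl]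
  omega

-- an index scan of positions 0..len-1 is a scan of the elements
lemma pvAllGetD (g : Char → Bool) (l : List Char) :
    (List.range l.length).all (fun k => g (l.getD k ' ')) = l.all g := by
  induction l with
  | nil => rfl
  | cons c t ih =>
    rw [List.length_cons, List.range_succ_eq_map, List.all_cons, List.all_map]
    simp only [Function.comp_def, List.getD_cons_zero, List.getD_cons_succ]
    rw [ih, List.all_cons]

-- A's index loop over positions 1..len-1 is a scan of the tail
lemma pvRangeAllTail (g : Char → Bool) (c : Char) (rest : List Char) :
    (PySem.List.pyRange 1 ((rest.length : Int) + 1) 1).all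
      (fun x => g (PySem.List.pyGetD (c :: rest) x ' ')) = rest.all g := by
  rw [PySem.List.pyRange_one, List.all_map,
    show ((rest.length : Int) + 1 - 1).toNat = rest.length by omega]
  have h2 : ((fun x => g (PySem.List.pyGetD (c :: rest) x ' ')) ∘ fun k : Nat => 1 + (k : Int))
      = fun k : Nat => g (rest.getD k ' ') := by
    funext k
    simp only [Function.comp_def]
    rw [show (1 + (k : Int)) = ((k + 1 : Nat) : Int) by push_cast; ring,
      PySem.List.pyGetD_natCast, List.getD_cons_succ]
  rw [h2, pvAllGetD]

-- ===== VERDICT (by name: the statement is the Claim_ definition above) =====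
theorem check_motorola_spec : Claim_equal_check_motorola := by
  intro s _
  unfold Spec_check_motorola check_motorola check_motorola_alt
  cases hl : PySem.Chars.strip s.toList with
  | nil => simp
  | cons c rest =>
    have hget : PySem.List.pyGetD (c :: rest) 0 ' ' = c := by
      simp [PySem.List.pyGetD]
    by_cases hc : (c == 'S' || c == 's') = true
    · have h1 : pvReStep 0 c = 1 := by simp [pvReStep, hc]
      simp only [List.foldl_cons, h1, pvFoldlLive, List.length_cons, hget]
      simp only [List.contains_eq_mem]
      rw [show ((rest.length + 1 : Nat) : Int) = ((rest.length : Int) + 1) by push_cast; ring]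
      rw [pvRangeAllTail (fun x => decide (x ∈ pvHexdigits)) c rest]
      simp [pvHexMemEq]
      intro _
      simpa using hc
    · have h2 : pvReStep 0 c = 2 := by simp [pvReStep, hc]
      simp only [List.foldl_cons, h2, pvFoldlDead, List.length_cons, hget]
      simp at hc
      simp [hc]
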